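-- pv_equiv track=rewrite | github.com/alvinwang922/Data-Structures-and-Algorithms | Arrays/Reverse-Equal.py | are_they_equal
-- ===== SOURCE A (Python) =====
-- def are_they_equal(array_a, array_b):
--     if array_a == array_b:
--         return True
--     if len(array_a) != len(array_b):
--         return False
--     for i in range(len(array_a)):
--         for j in range(i, len(array_b)):
--             if array_a[i] == array_b[j]:
--                 if array_a[:i] + array_a[i:j + 1][::-1] \
--                         + array_a[j + 1:] == array_b:
--                     return True
--     return False
-- ===== SOURCE B (Python) =====
-- def _common(a, b):
--     # length of the common prefix of a and b (lengths assumed equal by caller)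
--     n = 0
--     while n < len(a) and a[n] == b[n]:
--         n += 1
--     return n
--
-- def are_they_equal(array_a, array_b):
--     # O(n): trim the common prefix and common suffix, then the remaining
--     # middle of a must be the middle of b read backwards.
--     if len(array_a) != len(array_b):
--         return False
--     pre = _common(array_a, array_b)
--     if pre == len(array_a):
--         return True
--     suf = _common(array_a[::-1], array_b[::-1])
--     return array_a[pre:len(array_a) - suf] == array_b[pre:len(array_b) - suf][::-1]
-- ===== Notes on version B (the rewrite author's own statement) =====
-- stated objective: faster
-- what changed: Replaced A's O(n^3) nested search over all (i,j) reversal candidates by a linear two-ended trim: strip the common prefix and common suffix, then check that the remaining middle of a is the middle of b reversed.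
import Mathlib
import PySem

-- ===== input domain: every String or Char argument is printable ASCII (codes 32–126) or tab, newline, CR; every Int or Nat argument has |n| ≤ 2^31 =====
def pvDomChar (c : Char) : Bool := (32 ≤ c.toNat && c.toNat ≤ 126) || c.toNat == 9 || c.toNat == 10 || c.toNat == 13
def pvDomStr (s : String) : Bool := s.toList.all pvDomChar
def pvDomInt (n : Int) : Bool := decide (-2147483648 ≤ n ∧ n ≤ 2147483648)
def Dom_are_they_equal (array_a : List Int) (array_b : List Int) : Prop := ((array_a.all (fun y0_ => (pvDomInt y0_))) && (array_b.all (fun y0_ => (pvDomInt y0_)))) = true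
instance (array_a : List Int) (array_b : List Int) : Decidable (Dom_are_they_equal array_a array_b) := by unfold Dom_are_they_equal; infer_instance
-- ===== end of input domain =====

-- B replaces A's cubic all-pairs reversal search by a linear two-ended trim:
-- strip the common prefix and suffix, then the middle of a must be the middle
-- of b reversed; objective: faster (asymptotic).

-- ===== PORT A =====
-- Literal port of A: indices come from range so pyGet? is always in range;
-- a[i:j+1][::-1] is ported as (slice …).reverse.
def are_they_equal (array_a : List Int) (array_b : List Int) : Bool :=
  if array_a = array_b then true
  else if array_a.length ≠ array_b.length then false
  else
    (PySem.List.pyRange 0 (array_a.length : Int) 1).any (fun i =>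
      (PySem.List.pyRange i (array_b.length : Int) 1).any (fun j =>
        if PySem.List.pyGet? array_a i = PySem.List.pyGet? array_b j then
          decide (PySem.List.slice array_a none (some i)
              ++ (PySem.List.slice array_a (some i) (some (j + 1))).reverse
              ++ PySem.List.slice array_a (some (j + 1)) none = array_b)
        else false))

-- ===== PORT B =====
-- Port of Source B's _common: the while-loop scan as the obvious structural
-- recursion over the two lists (the caller only uses it on equal lengths).
def commonLen : List Int → List Int → Nat
  | x :: xs, y :: ys => if x = y then commonLen xs ys + 1 else 0
  | _, _ => 0

-- Port of Source B: trim common prefix/suffix, compare middle of a with reversed middle of b.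
def are_they_equal_alt (array_a : List Int) (array_b : List Int) : Bool :=
  if array_a.length ≠ array_b.length then false
  else
    let pre := commonLen array_a array_b
    if pre = array_a.length then true
    else
      let suf := commonLen array_a.reverse array_b.reverse
      decide (PySem.List.slice array_a (some (pre : Int)) (some ((array_a.length : Int) - (suf : Int)))
        = (PySem.List.slice array_b (some (pre : Int)) (some ((array_b.length : Int) - (suf : Int)))).reverse)

-- ===== PRECONDITION & SPEC =====
def Spec_are_they_equal (array_a : List Int) (array_b : List Int) (out : Bool) : Prop := out = are_they_equal_alt array_a array_b
instance (array_a : List Int) (array_b : List Int) (out : Bool) : Decidable (Spec_are_they_equal array_a array_b out) := by unfold Spec_are_they_equal; infer_instance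

-- ===== CLAIM (what is proved, stated in full; the proofs are below) =====
def Claim_equal_are_they_equal : Prop := ∀ (array_a : List Int) (array_b : List Int), Dom_are_they_equal array_a array_b → Spec_are_they_equal array_a array_b (are_they_equal array_a array_b)

-- ===== LEMMAS AND PROOFS =====

-- `spN a i j` is the spliced list a[:i] + a[i:j+1][::-1] + a[j+1:], in List form.
def spN (a : List Int) (i j : ℕ) : List Int :=
  a.take i ++ ((a.drop i).take (j + 1 - i)).reverse ++ a.drop (j + 1)

-- The mismatch positions of a and b, as naturals.
def miN (a b : List Int) : List ℕ :=
  (List.range a.length).filter (fun k => decide (a[k]? ≠ b[k]?))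

-- Pointwise description of `spN a i j = b`.
def spNP (a b : List Int) (i j t : ℕ) : Prop :=
  (if i ≤ t ∧ t ≤ j then a[i + j - t]? else a[t]?) = b[t]?

theorem slice_spN (a : List Int) (i j : ℕ) :
    PySem.List.slice a none (some (i : Int)) ++
      (PySem.List.slice a (some (i : Int)) (some ((j : Int) + 1))).reverse ++
      PySem.List.slice a (some ((j : Int) + 1)) none = spN a i j := by
  have h1 : ((j : Int) + 1) = (((j + 1 : ℕ)) : Int) := by push_cast; ring
  rw [h1, PySem.List.slice_to_natCast, PySem.List.slice_natCast,
    PySem.List.slice_from_natCast, spN]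

theorem spN_getElem? (a : List Int) (i j t : ℕ) (hij : i ≤ j) (hj : j < a.length) :
    (spN a i j)[t]? = if i ≤ t ∧ t ≤ j then a[i + j - t]? else a[t]? := by
  unfold spN
  have hlt : (a.take i).length = i := by simp; omega
  have hmid : ((a.drop i).take (j + 1 - i)).length = j + 1 - i := by simp; omega
  rw [List.append_assoc]
  by_cases h1 : t < i
  · rw [List.getElem?_append_left (by omega), List.getElem?_take_of_lt h1,
      if_neg (by omega)]
  · rw [List.getElem?_append_right (by omega)]
    by_cases h2 : t ≤ j
    · rw [List.getElem?_append_left (by simp; omega),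
        List.getElem?_reverse (by rw [hmid]; omega), hmid, hlt]
      have he : j + 1 - i - 1 - (t - i) = j - t := by omega
      rw [he, List.getElem?_take_of_lt (by omega), List.getElem?_drop,
        if_pos ⟨by omega, h2⟩]
      congr 1
      omega
    · rw [List.getElem?_append_right (by simp; omega), List.getElem?_drop,
      if_neg (by omega), hlt]
      congr 1
      simp
      omega

theorem spN_eq_iff (a b : List Int) (i j : ℕ) (hij : i ≤ j) (hj : j < a.length) :
    spN a i j = b ↔ ∀ t, spNP a b i j t := by
  constructor
  · intro h t
    rw [spNP, ← h, spN_getElem? a i j t hij hj]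
  · intro h
    apply List.ext_getElem?
    intro t
    rw [spN_getElem? a i j t hij hj]
    exact h t

theorem spNP_out (a b : List Int) (i j : ℕ) (h : ∀ t, spNP a b i j t) (t : ℕ)
    (ht : ¬(i ≤ t ∧ t ≤ j)) : a[t]? = b[t]? := by
  have := h t
  rwa [spNP, if_neg ht] at this

theorem spNP_all_eq (a b : List Int) (i j : ℕ) (hji : ¬ i ≤ j ∨ i = j)
    (h : ∀ t, spNP a b i j t) : a = b := by
  apply List.ext_getElem?
  intro t
  have ht := h t
  rw [spNP] at ht
  by_cases hc : i ≤ t ∧ t ≤ j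
  · rw [if_pos hc, show i + j - t = t by omega] at ht
    exact ht
  · rwa [if_neg hc] at ht

theorem spNP_shrink (a b : List Int) (i j : ℕ) (hij : i < j)
    (h : ∀ t, spNP a b i j t) (hi : a[i]? = b[i]?) :
    a[j]? = b[j]? ∧ ∀ t, spNP a b (i + 1) (j - 1) t := by
  have hbi := h i
  rw [spNP, if_pos ⟨le_refl i, le_of_lt hij⟩, show i + j - i = j by omega] at hbi
  have hbj := h j
  rw [spNP, if_pos ⟨le_of_lt hij, le_refl j⟩, show i + j - j = i by omega] at hbj
  have hj : a[j]? = b[j]? := by rw [hbi, ← hi, hbj]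
  refine ⟨hj, fun t => ?_⟩
  rw [spNP]
  by_cases hc : i + 1 ≤ t ∧ t ≤ j - 1
  · rw [if_pos hc, show i + 1 + (j - 1) - t = i + j - t by omega]
    have := h t
    rwa [spNP, if_pos (by omega)] at this
  · rw [if_neg hc]
    by_cases hti : t = i
    · subst hti; exact hi
    · by_cases htj : t = j
      · subst htj; exact hj
      · have := h t
        rwa [spNP, if_neg (by omega)] at this

theorem spNP_core (a b : List Int) (hab : a ≠ b) :
    ∀ d i j, j - i ≤ d → i ≤ j → (∀ t, spNP a b i j t) →
      ∃ i' j', i ≤ i' ∧ i' ≤ j' ∧ j' ≤ j ∧ (∀ t, spNP a b i' j' t) ∧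
        a[i']? ≠ b[i']? ∧ a[j']? ≠ b[j']? := by
  intro d
  induction d with
  | zero =>
    intro i j hd hij h
    exact absurd (spNP_all_eq a b i j (Or.inr (by omega)) h) hab
  | succ d ih =>
    intro i j hd hij h
    by_cases hmi : a[i]? = b[i]?
    · rcases Nat.lt_or_ge i j with hlt | hge
      · obtain ⟨hmj, h'⟩ := spNP_shrink a b i j hlt h hmi
        by_cases hdeg : i + 1 ≤ j - 1
        · obtain ⟨i', j', h1, h2, h3, h4, h5, h6⟩ := ih (i + 1) (j - 1) (by omega) hdeg h'
          exact ⟨i', j', by omega, h2, by omega, h4, h5, h6⟩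
        · exact absurd (spNP_all_eq a b (i + 1) (j - 1) (Or.inl hdeg) h') hab
      · exact absurd (spNP_all_eq a b i j (Or.inr (by omega)) h) hab
    · have hbj := h j
      rw [spNP, if_pos ⟨hij, le_refl j⟩, show i + j - j = i by omega] at hbj
      have hbi := h i
      rw [spNP, if_pos ⟨le_refl i, hij⟩, show i + j - i = j by omega] at hbi
      have hmj : a[j]? ≠ b[j]? := by
        intro he
        exact hmi (by rw [hbj, ← he, hbi])
      exact ⟨i, j, le_refl i, hij, le_refl j, h, hmi, hmj⟩

theorem mem_miN (a b : List Int) (k : ℕ) :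
    k ∈ miN a b ↔ k < a.length ∧ a[k]? ≠ b[k]? := by
  simp [miN]

theorem miN_pairwise (a b : List Int) : (miN a b).Pairwise (· < ·) :=
  List.Pairwise.filter _ List.pairwise_lt_range

theorem miN_nil_iff (a b : List Int) (hlen : a.length = b.length) :
    miN a b = [] ↔ a = b := by
  constructor
  · intro h
    apply List.ext_getElem?
    intro t
    by_cases ht : t < a.length
    · by_contra hne
      have : t ∈ miN a b := (mem_miN a b t).2 ⟨ht, hne⟩
      simp [h] at this
    · rw [List.getElem?_eq_none (by omega), List.getElem?_eq_none (by omega)]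
  · intro h
    subst h
    simp [miN]

theorem head_le_of_pairwise {l : List ℕ} (hp : l.Pairwise (· < ·)) (h : l ≠ [])
    {x : ℕ} (hx : x ∈ l) : l.head h ≤ x := by
  cases l with
  | nil => exact absurd rfl h
  | cons c t =>
    rcases List.mem_cons.1 hx with rfl | hx'
    · exact le_refl _
    · exact le_of_lt ((List.pairwise_cons.1 hp).1 x hx')

theorem le_getLast_of_pairwise {l : List ℕ} (hp : l.Pairwise (· < ·)) (h : l ≠ [])
    {x : ℕ} (hx : x ∈ l) : x ≤ l.getLast h := by
  induction l with
  | nil => exact absurd rfl h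
  | cons c t ih =>
    cases t with
    | nil =>
      simp at hx
      simp [hx, List.getLast]
    | cons e t' =>
      rw [List.getLast_cons (by simp)]
      rcases List.mem_cons.1 hx with rfl | hx'
      · exact le_of_lt ((List.pairwise_cons.1 hp).1 _ (List.getLast_mem (by simp)))
      · exact ih (List.pairwise_cons.1 hp).2 (by simp) hx'

theorem charA (a b : List Int) (hab : a ≠ b) (hlen : a.length = b.length) :
    are_they_equal a b = true ↔
      ∃ i j : ℕ, i ≤ j ∧ j < a.length ∧ a[i]? = b[j]? ∧ spN a i j = b := by
  unfold are_they_equal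
  rw [if_neg hab, if_neg (by simp [hlen])]
  simp only [List.any_eq_true]
  constructor
  · rintro ⟨i, hi, j, hj, hcheck⟩
    rw [PySem.List.mem_pyRange_one] at hi hj
    split at hcheck
    case isTrue hget =>
      rw [decide_eq_true_eq] at hcheck
      have hi0 : (0 : Int) ≤ i := hi.1
      have hj0 : (0 : Int) ≤ j := le_trans hi0 hj.1
      have hi' : ((i.toNat : ℕ) : Int) = i := Int.toNat_of_nonneg hi0
      have hj' : ((j.toNat : ℕ) : Int) = j := Int.toNat_of_nonneg hj0
      rw [← hi', ← hj'] at hcheck hget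
      rw [slice_spN] at hcheck
      rw [PySem.List.pyGet?_natCast, PySem.List.pyGet?_natCast] at hget
      refine ⟨i.toNat, j.toNat, ?_, ?_, hget, hcheck⟩
      · omega
      · have := hj.2
        omega
    case isFalse => exact absurd hcheck (by simp)
  · rintro ⟨i, j, hij, hjn, hget, hsp⟩
    refine ⟨(i : Int), ?_, (j : Int), ?_, ?_⟩
    · rw [PySem.List.mem_pyRange_one]
      constructor <;> [positivity; exact_mod_cast by omega]
    · rw [PySem.List.mem_pyRange_one]
      constructor
      · exact_mod_cast hij
      · rw [← hlen]; exact_mod_cast hjn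
    · rw [if_pos (by rw [PySem.List.pyGet?_natCast, PySem.List.pyGet?_natCast]; exact hget)]
      rw [decide_eq_true_eq, slice_spN]
      exact hsp

-- A = true iff reversing exactly the first-to-last mismatch segment yields b.
theorem A_iff_spN (a b : List Int) (hab : a ≠ b) (hlen : a.length = b.length)
    (hm : miN a b ≠ []) :
    are_they_equal a b = true ↔ spN a ((miN a b).head hm) ((miN a b).getLast hm) = b := by
  set k0 := (miN a b).head hm with hk0
  set kl := (miN a b).getLast hm with hkl
  have hk0m : k0 ∈ miN a b := List.head_mem hm
  have hklm : kl ∈ miN a b := List.getLast_mem hm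
  have hk0kl : k0 ≤ kl := head_le_of_pairwise (miN_pairwise a b) hm hklm
  have hkln : kl < a.length := ((mem_miN a b kl).1 hklm).1
  rw [charA a b hab hlen]
  constructor
  · rintro ⟨i, j, hij, hjn, _, hsp⟩
    have h := (spN_eq_iff a b i j hij hjn).1 hsp
    obtain ⟨i', j', h1, h2, h3, h4, h5, h6⟩ := spNP_core a b hab (j - i) i j (le_refl _) hij h
    have hi'm : i' ∈ miN a b := (mem_miN a b i').2 ⟨by omega, h5⟩
    have hj'm : j' ∈ miN a b := (mem_miN a b j').2 ⟨by omega, h6⟩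
    have hk0i : k0 = i' := by
      have h1' : k0 ≤ i' := head_le_of_pairwise (miN_pairwise a b) hm hi'm
      have h2' : i' ≤ k0 := by
        by_contra hc
        have hk0mis := ((mem_miN a b k0).1 hk0m).2
        exact hk0mis (spNP_out a b i' j' h4 k0 (by omega))
      omega
    have hklj : kl = j' := by
      have h1' : j' ≤ kl := le_getLast_of_pairwise (miN_pairwise a b) hm hj'm
      have h2' : kl ≤ j' := by
        by_contra hc
        have hklmis := ((mem_miN a b kl).1 hklm).2
        exact hklmis (spNP_out a b i' j' h4 kl (by omega))
      omega
    rw [hk0i, hklj]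
    exact (spN_eq_iff a b i' j' h2 (by omega)).2 h4
  · intro hsp
    have h := (spN_eq_iff a b k0 kl hk0kl hkln).1 hsp
    have hget : a[k0]? = b[kl]? := by
      have := h kl
      rwa [spNP, if_pos ⟨hk0kl, le_refl kl⟩, show k0 + kl - kl = k0 by omega] at this
    exact ⟨k0, kl, hk0kl, hkln, hget, hsp⟩

-- commonLen basics.
theorem commonLen_le (a b : List Int) : commonLen a b ≤ a.length ∧ commonLen a b ≤ b.length := by
  induction a generalizing b with
  | nil => simp [commonLen]
  | cons x xs ih =>
    cases b with
    | nil => simp [commonLen]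
    | cons y ys =>
      by_cases h : x = y
      · have := ih ys
        simp only [commonLen, if_pos h, List.length_cons]
        omega
      · simp only [commonLen, if_neg h]
        omega

theorem commonLen_eq_before (a b : List Int) (t : ℕ) (ht : t < commonLen a b) :
    a[t]? = b[t]? := by
  induction a generalizing b t with
  | nil => simp [commonLen] at ht
  | cons x xs ih =>
    cases b with
    | nil => simp [commonLen] at ht
    | cons y ys =>
      by_cases h : x = y
      · cases t with
        | zero => simp [h]
        | succ t' =>
          simp only [List.getElem?_cons_succ]
          exact ih ys t' (by simp [commonLen, h] at ht; omega)
      · simp [commonLen, h] at ht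

theorem commonLen_ne (a b : List Int) (h1 : commonLen a b < a.length)
    (h2 : commonLen a b < b.length) : a[commonLen a b]? ≠ b[commonLen a b]? := by
  induction a generalizing b with
  | nil => simp at h1
  | cons x xs ih =>
    cases b with
    | nil => simp at h2
    | cons y ys =>
      by_cases h : x = y
      · simp only [commonLen, if_pos h, List.length_cons] at h1 h2 ⊢
        simpa using ih ys (by omega) (by omega)
      · simp [commonLen, h]

theorem commonLen_full (a b : List Int) (hlen : a.length = b.length)
    (h : commonLen a b = a.length) : a = b := by
  apply List.ext_getElem?
  intro t
  by_cases ht : t < a.length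
  · exact commonLen_eq_before a b t (by omega)
  · rw [List.getElem?_eq_none (by omega), List.getElem?_eq_none (by omega)]

-- In the main case the trimmed bounds coincide with the first / last mismatch.
theorem pre_eq_head (a b : List Int) (hlen : a.length = b.length) (hm : miN a b ≠ []) :
    commonLen a b = (miN a b).head hm := by
  have hab : a ≠ b := fun h => hm (by rw [(miN_nil_iff a b hlen).2 h])
  have hle := commonLen_le a b
  have hlt : commonLen a b < a.length := by
    rcases Nat.lt_or_ge (commonLen a b) a.length with h | h
    · exact h
    · exact absurd (commonLen_full a b hlen (by omega)) hab
  have hmem : commonLen a b ∈ miN a b :=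
    (mem_miN a b _).2 ⟨hlt, commonLen_ne a b hlt (by omega)⟩
  have h1 : (miN a b).head hm ≤ commonLen a b :=
    head_le_of_pairwise (miN_pairwise a b) hm hmem
  have h2 : ¬ (miN a b).head hm < commonLen a b := by
    intro hc
    exact ((mem_miN a b _).1 (List.head_mem hm)).2 (commonLen_eq_before a b _ hc)
  omega

theorem suf_eq_last (a b : List Int) (hlen : a.length = b.length) (hm : miN a b ≠ []) :
    commonLen a.reverse b.reverse = a.length - 1 - (miN a b).getLast hm := by
  have hab : a ≠ b := fun h => hm (by rw [(miN_nil_iff a b hlen).2 h])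
  set s := commonLen a.reverse b.reverse with hs
  set kl := (miN a b).getLast hm with hkl
  have hklm : kl ∈ miN a b := List.getLast_mem hm
  have hkln : kl < a.length := ((mem_miN a b kl).1 hklm).1
  have hklmis : a[kl]? ≠ b[kl]? := ((mem_miN a b kl).1 hklm).2
  have hle := commonLen_le a.reverse b.reverse
  have hrlen : a.reverse.length = b.reverse.length := by simp [hlen]
  have hslt : s < a.length := by
    rcases Nat.lt_or_ge s a.reverse.length with h | h
    · have hx : a.reverse.length = a.length := a.length_reverse
      omega
    · have hfull := commonLen_full a.reverse b.reverse hrlen (by omega)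
      exact absurd (by simpa using congrArg List.reverse hfull) hab
  -- mismatch at position a.length - 1 - s
  have hsm : a[a.length - 1 - s]? ≠ b[a.length - 1 - s]? := by
    have h := commonLen_ne a.reverse b.reverse (by simpa using hslt)
      (by simp [← hlen]; omega)
    rwa [List.getElem?_reverse (by simpa using hslt),
      List.getElem?_reverse (by simp [← hlen]; omega), ← hlen] at h
  have h1 : a.length - 1 - s ≤ kl :=
    le_getLast_of_pairwise (miN_pairwise a b) hm
      ((mem_miN a b _).2 ⟨by omega, hsm⟩)
  have h2 : ¬ a.length - 1 - kl < s := by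
    intro hc
    have heq := commonLen_eq_before a.reverse b.reverse (a.length - 1 - kl) hc
    rw [List.getElem?_reverse (by omega),
      List.getElem?_reverse (by omega),
      show a.length - 1 - (a.length - 1 - kl) = kl by omega,
      show b.length - 1 - (a.length - 1 - kl) = kl by omega] at heq
    exact hklmis heq
  omega

-- The one-comparison middle test equals the splice test when the ends agree.
theorem mid_iff (a b : List Int) (i j : ℕ) (hlen : a.length = b.length)
    (hij : i ≤ j) (hjn : j < a.length)
    (hpre : a.take i = b.take i) (hsuf : a.drop (j + 1) = b.drop (j + 1)) :
    (spN a i j = b ↔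
      (a.drop i).take (j + 1 - i) = ((b.drop i).take (j + 1 - i)).reverse) := by
  have hbdec : b = b.take i ++ (b.drop i).take (j + 1 - i) ++ b.drop (j + 1) := by
    have h1 : b.take i ++ (b.drop i).take (j + 1 - i) = b.take (j + 1) := by
      rw [← List.take_add, show i + (j + 1 - i) = j + 1 by omega]
    rw [h1, List.take_append_drop]
  constructor
  · intro h
    rw [spN, hbdec, hpre, List.append_assoc, List.append_assoc] at h
    have h2 := List.append_cancel_left h
    rw [hsuf] at h2
    have h3 := List.append_cancel_right h2
    rw [← h3, List.reverse_reverse]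
  · intro h
    rw [spN, hbdec, hpre, hsuf, h, List.reverse_reverse]

-- Outside the mismatch block the two lists agree, as take/drop equalities.
theorem take_head_eq (a b : List Int) (hm : miN a b ≠ []) :
    a.take ((miN a b).head hm) = b.take ((miN a b).head hm) := by
  apply List.ext_getElem?
  intro t
  rw [List.getElem?_take, List.getElem?_take]
  split
  case isTrue ht =>
    by_contra hne
    have hhl : (miN a b).head hm < a.length := ((mem_miN a b _).1 (List.head_mem hm)).1
    have : (miN a b).head hm ≤ t :=
      head_le_of_pairwise (miN_pairwise a b) hm ((mem_miN a b t).2 ⟨by omega, hne⟩)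
    omega
  case isFalse => rfl

theorem drop_last_eq (a b : List Int) (hlen : a.length = b.length) (hm : miN a b ≠ []) :
    a.drop ((miN a b).getLast hm + 1) = b.drop ((miN a b).getLast hm + 1) := by
  apply List.ext_getElem?
  intro t
  rw [List.getElem?_drop, List.getElem?_drop]
  by_cases htl : (miN a b).getLast hm + 1 + t < a.length
  · by_contra hne
    have : (miN a b).getLast hm + 1 + t ≤ (miN a b).getLast hm :=
      le_getLast_of_pairwise (miN_pairwise a b) hm
        ((mem_miN a b _).2 ⟨htl, hne⟩)
    omega
  · rw [List.getElem?_eq_none (by omega), List.getElem?_eq_none (by omega)]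

-- B = true iff reversing exactly the first-to-last mismatch segment yields b.
theorem B_iff_spN (a b : List Int) (hlen : a.length = b.length) (hm : miN a b ≠ []) :
    are_they_equal_alt a b = true ↔
      spN a ((miN a b).head hm) ((miN a b).getLast hm) = b := by
  set k0 := (miN a b).head hm with hk0
  set kl := (miN a b).getLast hm with hkl
  have hk0kl : k0 ≤ kl :=
    head_le_of_pairwise (miN_pairwise a b) hm (List.getLast_mem hm)
  have hkln : kl < a.length := ((mem_miN a b kl).1 (List.getLast_mem hm)).1
  have hpre : commonLen a b = k0 := pre_eq_head a b hlen hm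
  have hsuf : commonLen a.reverse b.reverse = a.length - 1 - kl :=
    suf_eq_last a b hlen hm
  have hk0len : ¬ k0 = a.length := by omega
  unfold are_they_equal_alt
  rw [if_neg (by simp [hlen])]
  simp only [hpre, hsuf, if_neg hk0len]
  have hcast1 : (a.length : Int) - ((a.length - 1 - kl : ℕ) : Int)
      = ((kl + 1 : ℕ) : Int) := by push_cast; omega
  have hcast2 : (b.length : Int) - ((a.length - 1 - kl : ℕ) : Int)
      = ((kl + 1 : ℕ) : Int) := by push_cast; omega
  rw [hcast1, hcast2, PySem.List.slice_natCast, PySem.List.slice_natCast,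
    decide_eq_true_eq]
  exact (mid_iff a b k0 kl hlen hk0kl hkln (take_head_eq a b hm)
    (drop_last_eq a b hlen hm)).symm

theorem commonLen_refl (a : List Int) : commonLen a a = a.length := by
  induction a with
  | nil => simp [commonLen]
  | cons x xs ih => simp [commonLen, ih]

theorem are_they_equal_main (a b : List Int) :
    are_they_equal a b = are_they_equal_alt a b := by
  by_cases hlen : a.length = b.length
  · by_cases hab : a = b
    · subst hab
      have hA : are_they_equal a a = true := by unfold are_they_equal; rw [if_pos rfl]
      have hB : are_they_equal_alt a a = true := by
        unfold are_they_equal_alt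
        rw [if_neg (by simp)]
        simp [commonLen_refl]
      rw [hA, hB]
    · have hm : miN a b ≠ [] := fun h => hab ((miN_nil_iff a b hlen).1 h)
      rw [Bool.eq_iff_iff, A_iff_spN a b hab hlen hm, B_iff_spN a b hlen hm]
  · have hA : are_they_equal a b = false := by
      unfold are_they_equal
      rw [if_neg (fun h => hlen (by rw [h])), if_pos hlen]
    have hB : are_they_equal_alt a b = false := by
      unfold are_they_equal_alt
      rw [if_pos hlen]
    rw [hA, hB]

-- ===== VERDICT (by name: the statement is the Claim_ definition above) =====
theorem are_they_equal_spec : Claim_equal_are_they_equal := by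
  intro a b _
  unfold Spec_are_they_equal
  exact are_they_equal_main a b
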